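-- pv_equiv track=rewrite | github.com/foliarn/lolbot | modules/training_exercises.py | _get_frame_at_time
-- ===== SOURCE A (Python) =====
-- from typing import Optional, List, Dict, Any
--
-- def _get_frame_at_time(frames: List[Dict], time_ms: int) -> Optional[Dict]:
--     """Retourne la frame la plus proche avant time_ms"""
--     target_frame = None
--     for frame in frames:
--         if frame.get('timestamp', 0) <= time_ms:
--             target_frame = frame
--         else:
--             break
--     return target_frame
-- ===== SOURCE B (Python) =====
-- from typing import Optional, List, Dict, Any
--
-- def _get_frame_at_time(frames: List[Dict], time_ms: int) -> Optional[Dict]: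
--     """Retourne la frame la plus proche avant time_ms.
--     Binary search on the (ascending) timestamps instead of a linear scan."""
--     lo, hi = 0, len(frames)
--     while lo < hi:
--         mid = (lo + hi) // 2
--         if frames[mid].get('timestamp', 0) <= time_ms:
--             lo = mid + 1
--         else:
--             hi = mid
--     return frames[lo - 1] if lo else None
-- ===== Notes on version B (the rewrite author's own statement) =====
-- stated objective: alternative
-- what changed: B replaces A's linear scan-and-break by a hand-written binary search for the rightmost frame with timestamp <= time_ms; Pre_ restricts to frame lists sorted ascending by timestamp (the natural domain A's break assumes), since on unsorted lists A's break-at-first-exceeding result is an artefact of element order that binary search does not reproduce.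
-- outside the precondition, e.g. on _get_frame_at_time([{'timestamp': 5}, {'timestamp': 0}], 3): A returns None, B returns {'timestamp': 0}
import Mathlib
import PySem

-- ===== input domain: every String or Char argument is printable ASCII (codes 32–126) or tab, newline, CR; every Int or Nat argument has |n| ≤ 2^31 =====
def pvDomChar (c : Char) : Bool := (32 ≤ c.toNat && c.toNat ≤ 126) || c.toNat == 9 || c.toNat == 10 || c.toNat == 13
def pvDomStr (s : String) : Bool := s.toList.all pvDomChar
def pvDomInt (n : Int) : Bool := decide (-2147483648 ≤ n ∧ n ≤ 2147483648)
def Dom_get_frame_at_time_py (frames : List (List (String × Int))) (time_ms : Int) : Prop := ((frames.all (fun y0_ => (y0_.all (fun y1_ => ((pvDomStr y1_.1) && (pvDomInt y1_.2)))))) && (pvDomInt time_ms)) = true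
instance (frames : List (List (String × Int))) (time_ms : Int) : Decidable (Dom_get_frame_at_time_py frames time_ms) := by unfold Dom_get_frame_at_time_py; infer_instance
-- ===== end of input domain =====

-- B replaces A's linear scan-and-break by a binary search for the rightmost frame with
-- timestamp ≤ time_ms; equivalence is claimed on frame lists sorted ascending by timestamp.

-- ===== PORT A =====
-- the for-loop with its target_frame accumulator and the break
def pvALoop (time_ms : Int) : List (List (String × Int)) → Option (List (String × Int)) → Option (List (String × Int))
  | [], target_frame => target_frame
  | frame :: rest, target_frame =>
      if (PySem.Dict.mk frame).getD "timestamp" 0 ≤ time_ms then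
        pvALoop time_ms rest (some frame)
      else
        target_frame

def get_frame_at_time_py (frames : List (List (String × Int))) (time_ms : Int) : Option (List (String × Int)) :=
  pvALoop time_ms frames none

-- ===== PORT B =====
-- frames[i].get('timestamp', 0)  (i always in range where used)
def pvTs (frames : List (List (String × Int))) (i : Nat) : Int :=
  (PySem.Dict.mk (frames.getD i [])).getD "timestamp" 0

-- the while-loop of B: classic binary search for the insertion point after equal keys
def pvBSearch (frames : List (List (String × Int))) (t : Int) (lo hi : Nat) : Nat :=
  if _h : lo < hi then
    let mid := (lo + hi) / 2
    if pvTs frames mid ≤ t then pvBSearch frames t (mid + 1) hi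
    else pvBSearch frames t lo mid
  else lo
termination_by hi - lo
decreasing_by all_goals omega

def get_frame_at_time_py_alt (frames : List (List (String × Int))) (time_ms : Int) : Option (List (String × Int)) :=
  let lo := pvBSearch frames time_ms 0 frames.length
  if lo > 0 then PySem.List.pyGet? frames ((lo : Int) - 1) else none

-- ===== PRECONDITION & SPEC =====
-- Pre_ excludes frame lists NOT sorted ascending by their effective timestamp: there A's
-- break-at-first-exceeding result depends on element order and binary search is not applicable.
def Pre_get_frame_at_time_py (frames : List (List (String × Int))) (time_ms : Int) : Prop :=
  List.Pairwise (· ≤ ·) (frames.map (fun f => (PySem.Dict.mk f).getD "timestamp" 0))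
instance (frames : List (List (String × Int))) (time_ms : Int) : Decidable (Pre_get_frame_at_time_py frames time_ms) := by unfold Pre_get_frame_at_time_py; infer_instance

def pvWitness_get_frame_at_time_py : (List (List (String × Int))) × Int :=
  ([[("timestamp", 1)], [("timestamp", 3), ("x", 7)], [("timestamp", 3)]], 2)

def Spec_get_frame_at_time_py (frames : List (List (String × Int))) (time_ms : Int) (out : Option (List (String × Int))) : Prop := out = get_frame_at_time_py_alt frames time_ms
instance (frames : List (List (String × Int))) (time_ms : Int) (out : Option (List (String × Int))) : Decidable (Spec_get_frame_at_time_py frames time_ms out) := by unfold Spec_get_frame_at_time_py; infer_instance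

-- ===== CLAIM (what is proved, stated in full; the proofs are below) =====
def Claim_equal_get_frame_at_time_py : Prop := ∀ (frames : List (List (String × Int))) (time_ms : Int), Dom_get_frame_at_time_py frames time_ms → Pre_get_frame_at_time_py frames time_ms → Spec_get_frame_at_time_py frames time_ms (get_frame_at_time_py frames time_ms)

-- ===== LEMMAS AND PROOFS =====
-- the cut index: length of the longest prefix of frames with timestamp ≤ t (proof device only)
def pvCut (t : Int) : List (List (String × Int)) → Nat
  | [] => 0
  | frame :: rest =>
      if (PySem.Dict.mk frame).getD "timestamp" 0 ≤ t then pvCut t rest + 1 else 0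

theorem pvCut_le_length (t : Int) (frames : List (List (String × Int))) :
    pvCut t frames ≤ frames.length := by
  induction frames with
  | nil => simp [pvCut]
  | cons f rest ih =>
    simp only [pvCut, List.length_cons]
    split_ifs <;> omega

theorem pvCut_prefix (t : Int) (frames : List (List (String × Int))) :
    ∀ i, i < pvCut t frames → pvTs frames i ≤ t := by
  induction frames with
  | nil => simp [pvCut]
  | cons f rest ih =>
    intro i hi
    simp only [pvCut] at hi
    by_cases hf : (PySem.Dict.mk f).getD "timestamp" 0 ≤ t
    · rw [if_pos hf] at hi
      cases i with
      | zero => simpa [pvTs] using hf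
      | succ j => exact (by simpa [pvTs] using ih j (by omega))
    · rw [if_neg hf] at hi; omega

theorem pvCut_at (t : Int) (frames : List (List (String × Int)))
    (h : pvCut t frames < frames.length) : t < pvTs frames (pvCut t frames) := by
  induction frames with
  | nil => simp at h
  | cons f rest ih =>
    simp only [pvCut] at h ⊢
    by_cases hf : (PySem.Dict.mk f).getD "timestamp" 0 ≤ t
    · rw [if_pos hf] at h ⊢
      simpa [pvTs] using ih (by simpa using Nat.lt_of_succ_lt_succ (by simpa using h))
    · rw [if_neg hf] at h ⊢
      simpa [pvTs] using lt_of_not_ge hf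

-- A's loop equals "cut index, then the frame just before it" (acc is the fallback)
theorem pvALoop_eq (time_ms : Int) (frames : List (List (String × Int)))
    (acc : Option (List (String × Int))) :
    pvALoop time_ms frames acc =
      (if pvCut time_ms frames > 0 then frames[pvCut time_ms frames - 1]? else acc) := by
  induction frames generalizing acc with
  | nil => simp [pvALoop, pvCut]
  | cons f rest ih =>
    simp only [pvALoop, pvCut]
    by_cases h : (PySem.Dict.mk f).getD "timestamp" 0 ≤ time_ms
    · simp only [if_pos h, ih]
      by_cases h0 : pvCut time_ms rest > 0
      · simp only [if_pos h0]
        rw [if_pos (by omega)]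
        have : pvCut time_ms rest + 1 - 1 = (pvCut time_ms rest - 1) + 1 := by omega
        rw [this, List.getElem?_cons_succ]
      · have hz : pvCut time_ms rest = 0 := by omega
        simp [hz]
    · simp [h]

-- sortedness, index form
theorem pre_sorted_idx (frames : List (List (String × Int))) (time_ms : Int)
    (h : Pre_get_frame_at_time_py frames time_ms) :
    ∀ i j, i ≤ j → j < frames.length → pvTs frames i ≤ pvTs frames j := by
  intro i j hij hj
  rcases Nat.eq_or_lt_of_le hij with rfl | hlt
  · exact le_refl _
  · have hp := List.pairwise_iff_getElem.mp h i j
      (by simpa using lt_of_le_of_lt hij hj) (by simpa using hj) hlt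
    simpa [pvTs, List.getD_eq_getElem?_getD,
      List.getElem?_eq_getElem (lt_of_le_of_lt hij hj), List.getElem?_eq_getElem hj]
      using hp

-- binary search converges to the cut index on a sorted list
theorem pvBSearch_eq_cut (frames : List (List (String × Int))) (t : Int)
    (hs : ∀ i j, i ≤ j → j < frames.length → pvTs frames i ≤ pvTs frames j) :
    ∀ (d lo hi : Nat), hi - lo ≤ d → lo ≤ pvCut t frames → pvCut t frames ≤ hi →
      hi ≤ frames.length → pvBSearch frames t lo hi = pvCut t frames := by
  intro d
  induction d with
  | zero =>
    intro lo hi hd h1 h2 _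
    rw [pvBSearch]
    rw [dif_neg (by omega)]
    omega
  | succ k ih =>
    intro lo hi hd h1 h2 hn
    rw [pvBSearch]
    by_cases hlt : lo < hi
    · rw [dif_pos hlt]
      set mid := (lo + hi) / 2 with hmid
      have hmlo : lo ≤ mid := by omega
      have hmhi : mid < hi := by omega
      by_cases hts : pvTs frames mid ≤ t
      · rw [if_pos hts]
        have hcut : mid < pvCut t frames := by
          by_contra hc
          have hcm : pvCut t frames ≤ mid := by omega
          have hcn : pvCut t frames < frames.length := by omega
          have := pvCut_at t frames hcn
          have := hs (pvCut t frames) mid hcm (by omega)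
          omega
        exact ih (mid + 1) hi (by omega) hcut h2 hn
      · rw [if_neg hts]
        have hcut : pvCut t frames ≤ mid := by
          by_contra hc
          exact hts (pvCut_prefix t frames mid (by omega))
        exact ih lo mid (by omega) h1 hcut (by omega)
    · rw [dif_neg hlt]; omega

-- ===== VERDICT (by name: the statement is the Claim_ definition above) =====
theorem get_frame_at_time_py_spec : Claim_equal_get_frame_at_time_py := by
  intro frames time_ms _ hpre
  unfold Spec_get_frame_at_time_py get_frame_at_time_py get_frame_at_time_py_alt
  rw [pvALoop_eq]
  have hbs : pvBSearch frames time_ms 0 frames.length = pvCut time_ms frames :=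
    pvBSearch_eq_cut frames time_ms (pre_sorted_idx frames time_ms hpre)
      frames.length 0 frames.length (by omega) (by omega)
      (pvCut_le_length time_ms frames) (le_refl _)
  simp only [hbs]
  by_cases h0 : pvCut time_ms frames > 0
  · simp only [if_pos h0]
    have : ((pvCut time_ms frames : Int) - 1) = ((pvCut time_ms frames - 1 : Nat) : Int) := by
      omega
    rw [this, PySem.List.pyGet?_natCast]
  · simp [h0]
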